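-- pv_equiv track=rewrite | github.com/francoleon08/proyecto-topicos-microservicios | recomendador/src/recommender/Recommender.py | extract_predominant_from_soup
-- ===== SOURCE A (Python) =====
-- from collections import Counter
--
-- def extract_predominant_from_soup(soup):
--     tokens = soup.split()
--     token_counts = Counter(tokens)
--
--     genre_counts = Counter([token for token in tokens if token.startswith("genre:")])
--     cast_counts = Counter([token for token in tokens if token.startswith("cast:")])
--     director_counts = Counter([token for token in tokens if token.startswith("director:")])
--     language_counts = Counter([token for token in tokens if token.startswith("language:")])
--
--     predominant_genre = genre_counts.most_common(1)[0][0] if genre_counts else None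
--     predominant_cast = cast_counts.most_common(1)[0][0] if cast_counts else None
--     predominant_director = director_counts.most_common(1)[0][0] if director_counts else None
--     predominant_language = language_counts.most_common(1)[0][0] if language_counts else None
--
--     return predominant_genre, predominant_cast, predominant_director, predominant_language
-- ===== SOURCE B (Python) =====
-- def extract_predominant_from_soup(soup):
--     buckets = {}
--     for token in soup.split():
--         key = token[:token.find(':') + 1]
--         if key:
--             c = buckets.setdefault(key, {})
--             c[token] = c.get(token, 0) + 1
--
--     def top(key):
--         c = buckets.get(key)
--         if c is None:
--             return None
--         bestk, bestn = None, 0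
--         for k in c:
--             n = c[k]
--             if bestk is None or n > bestn:
--                 bestk, bestn = k, n
--         return bestk
--
--     return top('genre:'), top('cast:'), top('director:'), top('language:')
-- ===== Notes on version B (the rewrite author's own statement) =====
-- stated objective: simpler
-- what changed: Replaces four separate filtered-list Counters (plus an unused whole-token Counter) by a single pass that groups tokens into per-prefix count dicts keyed by the token's text up to and including its first colon, then reads the first-maximal token out of each bucket.
import Mathlib
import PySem

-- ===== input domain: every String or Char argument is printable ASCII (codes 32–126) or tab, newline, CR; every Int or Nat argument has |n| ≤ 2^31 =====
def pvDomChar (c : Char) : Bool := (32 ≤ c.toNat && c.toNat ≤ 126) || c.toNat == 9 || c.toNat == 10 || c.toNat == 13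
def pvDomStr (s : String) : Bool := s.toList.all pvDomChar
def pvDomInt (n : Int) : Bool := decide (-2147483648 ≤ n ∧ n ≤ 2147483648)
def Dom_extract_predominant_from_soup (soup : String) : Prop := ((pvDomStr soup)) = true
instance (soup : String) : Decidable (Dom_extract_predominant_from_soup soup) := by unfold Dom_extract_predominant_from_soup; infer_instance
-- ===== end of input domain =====

-- B replaces A's four filtered Counters (and an unused whole-token Counter) by one grouping pass
-- into per-prefix count dicts; objective: simpler (one pass over the tokens instead of five).

-- ===== PORT A =====
-- counts.most_common(1)[0][0]: first item of maximal count, scanning insertion order (CPython's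
-- nlargest(1) is max(items, key=count), which keeps the FIRST maximum)
def pvMostCommon1 (d : PySem.Dict String Int) : Option String :=
  match d.items with
  | [] => none
  | p :: rest => some ((rest.foldl (fun best q => if q.2 > best.2 then q else best) p).1)

def extract_predominant_from_soup (soup : String) : Option String × Option String × Option String × Option String :=
  let tokens := PySem.Str.split₀ soup
  let _token_counts := PySem.Dict.counter tokens   -- A computes this Counter and never uses it
  let genre_counts := PySem.Dict.counter (tokens.filter (fun t => PySem.Str.startswith t "genre:"))
  let cast_counts := PySem.Dict.counter (tokens.filter (fun t => PySem.Str.startswith t "cast:"))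
  let director_counts := PySem.Dict.counter (tokens.filter (fun t => PySem.Str.startswith t "director:"))
  let language_counts := PySem.Dict.counter (tokens.filter (fun t => PySem.Str.startswith t "language:"))
  (pvMostCommon1 genre_counts, pvMostCommon1 cast_counts,
   pvMostCommon1 director_counts, pvMostCommon1 language_counts)

-- ===== PORT B =====
-- token[:token.find(':') + 1]
def pvKeyOf (t : String) : String :=
  String.ofList (PySem.List.slice t.toList none (some (PySem.Str.find t ":" + 1)))

-- one step of B's grouping loop: c = buckets.setdefault(key, {}); c[token] = c.get(token, 0) + 1
def pvStep (b : PySem.Dict String (PySem.Dict String Int)) (token : String) :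
    PySem.Dict String (PySem.Dict String Int) :=
  let key := pvKeyOf token
  if key == "" then b
  else
    let c := b.getD key PySem.Dict.empty
    b.insert key (c.insert token (c.getD token 0 + 1))

-- B's top(key): linear scan over the bucket's keys keeping the first strictly-largest count
def pvTop (buckets : PySem.Dict String (PySem.Dict String Int)) (key : String) : Option String :=
  match buckets.get? key with
  | none => none
  | some c =>
    (c.keys.foldl (fun best k =>
        let n := c.getD k 0
        if best.1 == none || n > best.2 then (some k, n) else best)
      ((none : Option String), (0 : Int))).1

def extract_predominant_from_soup_alt (soup : String) : Option String × Option String × Option String × Option String :=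
  let buckets := (PySem.Str.split₀ soup).foldl pvStep PySem.Dict.empty
  (pvTop buckets "genre:", pvTop buckets "cast:", pvTop buckets "director:", pvTop buckets "language:")

-- ===== PRECONDITION & SPEC =====
def Spec_extract_predominant_from_soup (soup : String) (out : Option String × Option String × Option String × Option String) : Prop := out = extract_predominant_from_soup_alt soup
instance (soup : String) (out : Option String × Option String × Option String × Option String) : Decidable (Spec_extract_predominant_from_soup soup out) := by unfold Spec_extract_predominant_from_soup; infer_instance

-- ===== CLAIM (what is proved, stated in full; the proofs are below) =====
def Claim_equal_extract_predominant_from_soup : Prop := ∀ (soup : String), Dom_extract_predominant_from_soup soup → Spec_extract_predominant_from_soup soup (extract_predominant_from_soup soup)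

-- ===== LEMMAS AND PROOFS =====

-- find.go with needle ":" is a single-character scan: characterise it by idxOf
theorem pv_find_go_colon (l : List Char) (k : Nat) :
    PySem.Chars.find.go [':'] l k =
      if ':' ∈ l then ((k + l.idxOf ':' : Nat) : Int) else -1 := by
  induction l generalizing k with
  | nil => simp [PySem.Chars.find.go]
  | cons c t ih =>
    by_cases hc : c = ':'
    · subst hc
      simp [PySem.Chars.find.go, List.isPrefixOf]
    · have : ([':'].isPrefixOf (c :: t)) = false := by
        simp [List.isPrefixOf, Ne.symm hc]
      simp only [PySem.Chars.find.go, this, Bool.false_eq_true, if_false, ih]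
      by_cases hm : ':' ∈ t
      · simp [hm, Ne.symm hc, List.idxOf_cons_ne t hc]
        omega
      · simp [hm, Ne.symm hc]

-- the token's derived key (everything up to and including the first ':') equals a prefix
-- q ++ ":" (with ':' ∉ q) exactly when the token starts with that prefix
theorem pv_key_iff_startswith (cs q : List Char) (hq : ':' ∉ q) :
    PySem.List.slice cs none (some (PySem.Chars.find cs [':'] + 1)) = q ++ [':'] ↔
      PySem.Chars.startswith cs (q ++ [':']) = true := by
  have hfind : PySem.Chars.find cs [':'] =
      if ':' ∈ cs then ((cs.idxOf ':' : Nat) : Int) else -1 := by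
    simpa using pv_find_go_colon cs 0
  rw [PySem.Chars.startswith_iff]
  by_cases hm : ':' ∈ cs
  · rw [hfind]
    simp only [hm, if_true]
    have h1 : ((cs.idxOf ':' : Nat) : Int) + 1 = ((cs.idxOf ':' + 1 : Nat) : Int) := by
      push_cast; ring
    rw [h1, PySem.List.slice_to_natCast]
    constructor
    · intro h
      rw [← h]
      exact List.take_prefix _ _
    · intro h
      obtain ⟨r, hr⟩ := h
      have hidx : cs.idxOf ':' = q.length := by
        rw [← hr, List.append_assoc, List.idxOf_append]
        simp [hq, List.idxOf_cons_self]
      rw [hidx, ← hr, List.take_left' (by simp)]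
  · rw [hfind]
    simp only [hm, if_false]
    have h0 : (-1 : Int) + 1 = ((0 : Nat) : Int) := by norm_num
    rw [h0, PySem.List.slice_to_natCast]
    simp only [List.take_zero]
    constructor
    · intro h; exact absurd h.symm (by simp)
    · intro h
      exfalso
      exact hm (h.mem (by simp))

theorem pv_bucket_get (ts : List String) (b : PySem.Dict String (PySem.Dict String Int))
    (p : String) (hp : p ≠ "") :
    ((ts.foldl pvStep b).get? p) =
      if (ts.filter (fun t => pvKeyOf t == p)).isEmpty then b.get? p
      else some ((ts.filter (fun t => pvKeyOf t == p)).foldl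
        (fun c t => c.insert t (c.getD t 0 + 1)) (b.getD p PySem.Dict.empty)) := by
  induction ts generalizing b with
  | nil => simp
  | cons t ts ih =>
    simp only [List.foldl_cons, List.filter_cons]
    by_cases hk : (pvKeyOf t == p) = true
    · have hkp : pvKeyOf t = p := by exact eq_of_beq hk
      have hne : (p == "") = false := by
        simp [hp]
      have hstep : pvStep b t =
          b.insert p ((b.getD p PySem.Dict.empty).insert t
            ((b.getD p PySem.Dict.empty).getD t 0 + 1)) := by
        simp [pvStep, hkp, hne]
      rw [hstep, ih]
      simp only [hk, if_true, List.isEmpty_cons]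
      have hget : (b.insert p ((b.getD p PySem.Dict.empty).insert t
            ((b.getD p PySem.Dict.empty).getD t 0 + 1))).get? p =
          some ((b.getD p PySem.Dict.empty).insert t
            ((b.getD p PySem.Dict.empty).getD t 0 + 1)) :=
        PySem.Dict.get?_insert_self _ _ _
      have hgetD : (b.insert p ((b.getD p PySem.Dict.empty).insert t
            ((b.getD p PySem.Dict.empty).getD t 0 + 1))).getD p PySem.Dict.empty =
          ((b.getD p PySem.Dict.empty).insert t
            ((b.getD p PySem.Dict.empty).getD t 0 + 1)) := by
        simp [PySem.Dict.getD]
      rw [hgetD, hget]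
      by_cases he : (ts.filter (fun t => pvKeyOf t == p)).isEmpty
      · have hfs := List.isEmpty_iff.mp he
        simp [hfs]
      · simp [he]
    · have hkb : (pvKeyOf t == p) = false := by
        simpa using hk
      by_cases h0 : (pvKeyOf t == "") = true
      · have : pvStep b t = b := by simp [pvStep, h0]
        rw [this, ih]
        simp [hkb]
      · have h0f : (pvKeyOf t == "") = false := by simpa using h0
        have hstep : pvStep b t =
            b.insert (pvKeyOf t) ((b.getD (pvKeyOf t) PySem.Dict.empty).insert t
              ((b.getD (pvKeyOf t) PySem.Dict.empty).getD t 0 + 1)) := by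
          simp [pvStep, h0f]
        have hnep : p ≠ pvKeyOf t := by
          intro h
          rw [← h] at hkb
          simp at hkb
        rw [hstep, ih]
        have hget : ∀ v, (b.insert (pvKeyOf t) v).get? p = b.get? p :=
          fun v => PySem.Dict.get?_insert_of_ne b v hnep
        have hgetD : ∀ v, (b.insert (pvKeyOf t) v).getD p PySem.Dict.empty =
            b.getD p PySem.Dict.empty := by
          intro v
          simp [PySem.Dict.getD, PySem.Dict.get?_insert_of_ne b v hnep]
        rw [hget _, hgetD _]
        simp [hkb]

-- scanning a bucket's keys with getD-lookups equals scanning its item list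
theorem pv_fold_keys_items (l : List (String × Int)) (g : String → Int)
    (k0 : String) (v0 : Int) (h : ∀ p ∈ l, g p.1 = p.2) :
    ((l.map Prod.fst).foldl (fun best k =>
        if best.1 == none || g k > best.2 then (some k, g k) else best) (some k0, v0)) =
      (some (l.foldl (fun best q => if q.2 > best.2 then q else best) (k0, v0)).1,
       (l.foldl (fun best q => if q.2 > best.2 then q else best) (k0, v0)).2) := by
  induction l generalizing k0 v0 with
  | nil => simp
  | cons a l ih =>
    have ha := h a (by simp)
    simp only [List.map_cons, List.foldl_cons, ha]
    by_cases hgt : a.2 > v0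
    · simpa [hgt] using ih a.1 a.2 (fun p hp => h p (by simp [hp]))
    · simpa [hgt] using ih k0 v0 (fun p hp => h p (by simp [hp]))

-- per-prefix agreement of the two programs' selections
theorem pv_component (ts : List String) (p : String) (hp : p ≠ "")
    (hk : ∀ t, (pvKeyOf t == p) = PySem.Str.startswith t p) :
    pvTop (ts.foldl pvStep PySem.Dict.empty) p =
      pvMostCommon1 (PySem.Dict.counter (ts.filter (fun t => PySem.Str.startswith t p))) := by
  have hfilter : ts.filter (fun t => pvKeyOf t == p) = ts.filter (fun t => PySem.Str.startswith t p) :=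
    List.filter_congr (fun t _ => hk t)
  have hb := pv_bucket_get ts PySem.Dict.empty p hp
  rw [hfilter] at hb
  unfold pvTop
  rw [hb]
  cases hfs : ts.filter (fun t => PySem.Str.startswith t p) with
  | nil =>
    simp [pvMostCommon1, PySem.Dict.counter, PySem.Dict.empty, PySem.Dict.get?]
  | cons f fs' =>
    simp only [List.isEmpty_cons, Bool.false_eq_true, if_false]
    have hempty : (PySem.Dict.empty : PySem.Dict String (PySem.Dict String Int)).getD p
        PySem.Dict.empty = PySem.Dict.empty := by
      simp [PySem.Dict.getD, PySem.Dict.get?, PySem.Dict.empty]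
    rw [hempty, PySem.Dict.foldl_insert_getD_add_one_eq_counter]
    cases hS : PySem.Set.ofList (f :: fs') with
    | nil =>
      exfalso
      have : f ∈ PySem.Set.ofList (f :: fs') := (PySem.Set.mem_ofList _ _).mpr (by simp)
      rw [hS] at this
      simp at this
    | cons s0 srest =>
      have hitems : (PySem.Dict.counter (f :: fs')).items =
          (s0, ((f :: fs').count s0 : Int)) ::
            srest.map (fun k => (k, ((f :: fs').count k : Int))) := by
        rw [PySem.Dict.items_counter, hS, List.map_cons]
      have hkeys : (PySem.Dict.counter (f :: fs')).keys = s0 :: srest := by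
        rw [PySem.Dict.keys_counter, hS]
      have hsrest : (srest.map (fun k => (k, ((f :: fs').count k : Int)))).map Prod.fst = srest := by
        simp [Function.comp_def]
      have hgD : ∀ pr ∈ srest.map (fun k => (k, ((f :: fs').count k : Int))),
          ((f :: fs').count pr.1 : Int) = pr.2 := by
        intro pr hpr
        obtain ⟨k, _, rfl⟩ := List.mem_map.mp hpr
        rfl
      rw [hkeys]
      unfold pvMostCommon1
      rw [hitems]
      simp only [List.foldl_cons, PySem.Dict.getD_counter, beq_self_eq_true, Bool.true_or,
        if_true]
      rw [← hsrest, pv_fold_keys_items _ _ _ _ hgD]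
      simp [hsrest]

-- the Bool-level form of the key characterisation, at String level
theorem pv_key_bool (t p : String) (q : List Char) (hp : p.toList = q ++ [':'])
    (hq : ':' ∉ q) : (pvKeyOf t == p) = PySem.Str.startswith t p := by
  have hcolon : (":" : String).toList = [':'] := rfl
  have h1 : pvKeyOf t = p ↔ PySem.Chars.startswith t.toList (q ++ [':']) = true := by
    unfold pvKeyOf
    rw [String.ofList_eq, hp, PySem.Str.find_eq, hcolon]
    exact pv_key_iff_startswith t.toList q hq
  rw [Bool.eq_iff_iff, beq_iff_eq, PySem.Str.startswith_eq, hp]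
  exact h1

-- ===== VERDICT (by name: the statement is the Claim_ definition above) =====
theorem extract_predominant_from_soup_spec : Claim_equal_extract_predominant_from_soup := by
  intro soup _
  unfold Spec_extract_predominant_from_soup
  have hg := pv_component (PySem.Str.split₀ soup) "genre:" (by decide)
    (fun t => pv_key_bool t "genre:" "genre".toList (by decide) (by decide))
  have hc := pv_component (PySem.Str.split₀ soup) "cast:" (by decide)
    (fun t => pv_key_bool t "cast:" "cast".toList (by decide) (by decide))
  have hd := pv_component (PySem.Str.split₀ soup) "director:" (by decide)
    (fun t => pv_key_bool t "director:" "director".toList (by decide) (by decide))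
  have hl := pv_component (PySem.Str.split₀ soup) "language:" (by decide)
    (fun t => pv_key_bool t "language:" "language".toList (by decide) (by decide))
  show (pvMostCommon1 (PySem.Dict.counter ((PySem.Str.split₀ soup).filter
          (fun t => PySem.Str.startswith t "genre:"))),
        pvMostCommon1 (PySem.Dict.counter ((PySem.Str.split₀ soup).filter
          (fun t => PySem.Str.startswith t "cast:"))),
        pvMostCommon1 (PySem.Dict.counter ((PySem.Str.split₀ soup).filter
          (fun t => PySem.Str.startswith t "director:"))),
        pvMostCommon1 (PySem.Dict.counter ((PySem.Str.split₀ soup).filter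
          (fun t => PySem.Str.startswith t "language:")))) =
       (pvTop ((PySem.Str.split₀ soup).foldl pvStep PySem.Dict.empty) "genre:",
        pvTop ((PySem.Str.split₀ soup).foldl pvStep PySem.Dict.empty) "cast:",
        pvTop ((PySem.Str.split₀ soup).foldl pvStep PySem.Dict.empty) "director:",
        pvTop ((PySem.Str.split₀ soup).foldl pvStep PySem.Dict.empty) "language:")
  rw [hg, hc, hd, hl]
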